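-- pv_equiv track=rewrite | github.com/thekidder/adventofcode | 2024/day21/solution.py | subseqs
-- ===== SOURCE A (Python) =====
-- def subseqs(seq):
--     try:
--         i = 0
--         while i < len(seq):
--             j = seq.index('A', i)
--             yield seq[i:j+1]
--             i = j + 1
--     except:
--         pass
-- ===== SOURCE B (Python) =====
-- def subseqs(seq):
--     # One pass over the characters with an accumulator buffer: emit buffer
--     # whenever an 'A' is seen; the tail after the last 'A' is never emitted.
--     buf = []
--     for ch in seq:
--         buf.append(ch)
--         if ch == 'A':
--             yield ''.join(buf)
--             buf = []
-- ===== Notes on version B (the rewrite author's own statement) =====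
-- stated objective: simpler
-- what changed: Replaces the index-based while loop with repeated seq.index('A', i) searches and slicing by a single character-level pass that grows a buffer and emits it at each 'A'; no index arithmetic, no exception-driven termination.
import Mathlib
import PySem

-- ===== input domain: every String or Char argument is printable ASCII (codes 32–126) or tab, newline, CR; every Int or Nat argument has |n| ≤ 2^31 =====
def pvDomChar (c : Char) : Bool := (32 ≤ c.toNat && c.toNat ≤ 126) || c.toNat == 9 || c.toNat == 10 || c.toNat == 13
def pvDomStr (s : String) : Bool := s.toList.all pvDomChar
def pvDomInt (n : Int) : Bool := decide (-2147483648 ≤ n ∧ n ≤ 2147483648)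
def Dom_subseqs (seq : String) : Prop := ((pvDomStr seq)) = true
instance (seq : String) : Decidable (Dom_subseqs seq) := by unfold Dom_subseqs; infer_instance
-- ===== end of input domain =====

-- B replaces A's index-based while loop (repeated seq.index('A', i) + slicing)
-- with one character pass growing a buffer emitted at each 'A' (objective: simpler).

-- ===== PORT A =====
-- while i < len(seq): j = seq.index('A', i); yield seq[i:j+1]; i = j+1
-- str.index raising ValueError (no 'A' at ≥ i) ends the generator via the bare except;
-- ported as idxOf? on the dropped char list returning none (exact: 'A' is a single char,
-- and the guard keeps 0 ≤ i ≤ len so the start-clamping of .index is irrelevant).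
def subseqsLoop (cs : List Char) (i : Nat) (fuel : Nat) : List String :=
  match fuel with
  | 0 => []
  | fuel + 1 =>
    if i < cs.length then
      match (cs.drop i).idxOf? 'A' with
      | none => []        -- ValueError → except: pass
      | some k =>
        -- j = i + k; seq[i:j+1] = take (k+1) (drop i)
        String.ofList ((cs.drop i).take (k + 1)) :: subseqsLoop cs (i + k + 1) fuel
    else []

def subseqs (seq : String) : List String :=
  subseqsLoop seq.toList 0 seq.toList.length

-- ===== PORT B =====
-- buf = []; for ch in seq: buf.append(ch); if ch == 'A': yield ''.join(buf); buf = []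
def stepB (st : List String × List Char) (ch : Char) : List String × List Char :=
  let buf := st.2 ++ [ch]
  if ch == 'A' then (st.1 ++ [String.ofList buf], []) else (st.1, buf)

def subseqs_alt (seq : String) : List String :=
  (seq.toList.foldl stepB ([], [])).1

-- ===== PRECONDITION & SPEC =====
def Spec_subseqs (seq : String) (out : List String) : Prop := out = subseqs_alt seq
instance (seq : String) (out : List String) : Decidable (Spec_subseqs seq out) := by unfold Spec_subseqs; infer_instance

-- ===== CLAIM (what is proved, stated in full; the proofs are below) =====
def Claim_equal_subseqs : Prop := ∀ (seq : String), Dom_subseqs seq → Spec_subseqs seq (subseqs seq)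

-- ===== LEMMAS AND PROOFS =====

-- reference chunking both ports are reduced to
def chunks : List Char → List Char → List String
  | [], _ => []
  | c :: cs, buf =>
    if c = 'A' then String.ofList (buf ++ [c]) :: chunks cs []
    else chunks cs (buf ++ [c])

theorem foldl_eq_chunks (cs : List Char) (acc : List String) (buf : List Char) :
    (cs.foldl stepB (acc, buf)).1 = acc ++ chunks cs buf := by
  induction cs generalizing acc buf with
  | nil => simp [chunks]
  | cons c cs ih =>
    by_cases h : c = 'A' <;>
      simp [List.foldl_cons, stepB, chunks, h, ih, List.append_assoc]

theorem chunks_of_no_A (cs : List Char) (buf : List Char) (h : 'A' ∉ cs) :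
    chunks cs buf = [] := by
  induction cs generalizing buf with
  | nil => rfl
  | cons c cs ih =>
    simp only [List.mem_cons, not_or] at h
    have hne : c ≠ 'A' := fun hh => h.1 hh.symm
    simp [chunks, hne, ih _ h.2]

theorem chunks_of_idxOf (cs : List Char) (k : Nat) (buf : List Char)
    (h : cs.idxOf? 'A' = some k) :
    chunks cs buf = String.ofList (buf ++ cs.take (k + 1)) :: chunks (cs.drop (k + 1)) [] := by
  induction cs generalizing k buf with
  | nil => simp [List.idxOf?] at h
  | cons c cs ih =>
    by_cases hc : c = 'A'
    · subst hc
      have hk : k = 0 := by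
        simpa [List.idxOf?_cons] using h.symm
      subst hk
      simp [chunks]
    · rw [List.idxOf?_cons, if_neg (by simpa using hc)] at h
      obtain ⟨m, hm, hmk⟩ := Option.map_eq_some_iff.mp h
      subst hmk
      simp [chunks, hc, ih m _ hm, List.append_assoc]

theorem loop_eq_chunks (fuel : Nat) (cs : List Char) (i : Nat)
    (hfuel : cs.length - i ≤ fuel) :
    subseqsLoop cs i fuel = chunks (cs.drop i) [] := by
  induction fuel generalizing i with
  | zero =>
    have : cs.length ≤ i := by omega
    simp [subseqsLoop, List.drop_eq_nil_of_le this, chunks]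
  | succ fuel ih =>
    by_cases hi : i < cs.length
    · simp only [subseqsLoop, if_pos hi]
      cases hfind : (cs.drop i).idxOf? 'A' with
      | none =>
        have : 'A' ∉ cs.drop i := List.idxOf?_eq_none_iff.mp hfind
        rw [chunks_of_no_A _ _ this]
      | some k =>
        have hdd : (cs.drop i).drop (k + 1) = cs.drop (i + k + 1) := by
          rw [List.drop_drop]; ring_nf
        rw [chunks_of_idxOf _ _ _ hfind]
        simp [ih (i + k + 1) (by omega), hdd]
    · have hle : cs.length ≤ i := by omega
      simp [subseqsLoop, hi, List.drop_eq_nil_of_le hle, chunks]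

-- ===== VERDICT (by name: the statement is the Claim_ definition above) =====
theorem subseqs_spec : Claim_equal_subseqs := by
  intro seq _
  unfold Spec_subseqs subseqs subseqs_alt
  rw [foldl_eq_chunks, loop_eq_chunks seq.toList.length seq.toList 0 (by omega)]
  simp
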